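-- pv_equiv track=rewrite | github.com/Fundator/geotolkparser | geotolktools/parser.py | _get_blocks
-- ===== SOURCE A (Python) =====
-- def _get_blocks(lines: list) -> list:
--     blocks, current_block = [], []
--     for line in lines:
--         if line == "*":
--             blocks.append(current_block)
--             current_block = []
--         else:
--             current_block.append(line)
--     if current_block:
--         blocks.append(current_block)
--     # Remove empty blocks
--     return [b for b in blocks if b]
-- ===== SOURCE B (Python) =====
-- def _get_blocks(lines: list) -> list:
--     # Run-scanning over indices: skip runs of "*", slice out runs of non-"*" lines.
--     blocks = []
--     i, n = 0, len(lines)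
--     while i < n:
--         if lines[i] == "*":
--             while i < n and lines[i] == "*":
--                 i += 1
--         else:
--             j = i
--             while j < n and lines[j] != "*":
--                 j += 1
--             blocks.append(lines[i:j])
--             i = j
--     return blocks
-- ===== Notes on version B (the rewrite author's own statement) =====
-- stated objective: simpler
-- what changed: Replaces the accumulator/flush/filter pipeline with a single run-scanning pass that skips runs of '*' and slices out each maximal run of non-'*' lines, so no empty blocks are ever created and no post-filter or trailing flush is needed.
import Mathlib
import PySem

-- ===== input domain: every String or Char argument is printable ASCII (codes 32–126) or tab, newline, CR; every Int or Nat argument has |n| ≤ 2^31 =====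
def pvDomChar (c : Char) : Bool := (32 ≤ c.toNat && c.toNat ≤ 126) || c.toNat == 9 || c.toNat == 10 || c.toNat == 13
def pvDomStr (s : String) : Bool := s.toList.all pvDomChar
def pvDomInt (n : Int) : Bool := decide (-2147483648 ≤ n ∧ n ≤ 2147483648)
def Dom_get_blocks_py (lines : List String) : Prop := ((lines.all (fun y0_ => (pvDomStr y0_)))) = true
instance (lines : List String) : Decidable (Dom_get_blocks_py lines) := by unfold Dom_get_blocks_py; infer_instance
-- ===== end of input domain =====

-- B replaces A's accumulator/flush/filter pipeline by a single run-scanning pass (simpler; return value only).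


-- ===== PORT A =====
-- A: fold accumulating (blocks, current_block), flush the trailing block, filter out empties.
def get_blocks_py (lines : List String) : List (List String) :=
  let s := lines.foldl
    (fun (s : List (List String) × List String) line =>
      if line == "*" then (s.1 ++ [s.2], []) else (s.1, s.2 ++ [line]))
    ([], [])
  (if s.2.isEmpty then s.1 else s.1 ++ [s.2]).filter (fun b => !b.isEmpty)

-- ===== PORT B =====
-- B: run-scanning — skip a run of "*", or take the maximal run of non-"*" lines as a block.
def get_blocks_py_alt (lines : List String) : List (List String) :=
  match lines with
  | [] => []
  | l :: rest =>
    if l == "*" then get_blocks_py_alt (rest.dropWhile (fun x => x == "*"))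
    else (l :: rest.takeWhile (fun x => x != "*")) ::
         get_blocks_py_alt (rest.dropWhile (fun x => x != "*"))
termination_by lines.length
decreasing_by
  · exact Nat.lt_succ_of_le (List.length_dropWhile_le _ _)
  · exact Nat.lt_succ_of_le (List.length_dropWhile_le _ _)

-- ===== PRECONDITION & SPEC =====
def Spec_get_blocks_py (lines : List String) (out : List (List String)) : Prop := out = get_blocks_py_alt lines
instance (lines : List String) (out : List (List String)) : Decidable (Spec_get_blocks_py lines out) := by unfold Spec_get_blocks_py; infer_instance

-- ===== CLAIM (what is proved, stated in full; the proofs are below) =====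
def Claim_equal_get_blocks_py : Prop := ∀ (lines : List String), Dom_get_blocks_py lines → Spec_get_blocks_py lines (get_blocks_py lines)

-- ===== LEMMAS AND PROOFS =====

-- canonical continuation of A's loop: result when the remaining input is `lines` and the open block is `cur`
def gBlocks (cur : List String) (lines : List String) : List (List String) :=
  match lines with
  | [] => if cur.isEmpty then [] else [cur]
  | l :: rest =>
    if l == "*" then (if cur.isEmpty then [] else [cur]) ++ gBlocks [] rest
    else gBlocks (cur ++ [l]) rest

theorem foldA_eq (lines : List String) : ∀ (blocks : List (List String)) (cur : List String),
    (let s := lines.foldl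
      (fun (s : List (List String) × List String) line =>
        if line == "*" then (s.1 ++ [s.2], []) else (s.1, s.2 ++ [line]))
      (blocks, cur)
     (if s.2.isEmpty then s.1 else s.1 ++ [s.2]).filter (fun b => !b.isEmpty))
    = blocks.filter (fun b => !b.isEmpty) ++ gBlocks cur lines := by
  induction lines with
  | nil =>
    intro blocks cur
    simp only [List.foldl_nil, gBlocks]
    by_cases h : cur.isEmpty <;> simp [h]
  | cons l rest ih =>
    intro blocks cur
    simp only [List.foldl_cons, gBlocks]
    by_cases h : l == "*"
    · simp only [h, if_pos]
      rw [ih]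
      by_cases hc : cur.isEmpty
      · simp [List.isEmpty_iff.mp hc]
      · simp [hc]
    · simp only [h, if_neg, Bool.false_eq_true, not_false_iff]
      rw [ih]

theorem dropStar_eq (xs : List String) :
    get_blocks_py_alt (xs.dropWhile (fun x => x == "*")) = get_blocks_py_alt xs := by
  induction xs with
  | nil => rfl
  | cons h t ih =>
    by_cases hs : h == "*"
    · have hd : List.dropWhile (fun x => x == "*") (h :: t)
          = List.dropWhile (fun x => x == "*") t := by
        simp [hs]
      rw [hd]
      conv_rhs => rw [get_blocks_py_alt]
      simp [hs]
    · have hd : List.dropWhile (fun x => x == "*") (h :: t) = h :: t := by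
        simp [hs]
      rw [hd]

theorem gBlocks_eq_alt (n : Nat) : ∀ (lines : List String), lines.length ≤ n →
    (gBlocks [] lines = get_blocks_py_alt lines ∧
     ∀ cur : List String, ¬ cur.isEmpty →
       gBlocks cur lines =
         (cur ++ lines.takeWhile (fun x => x != "*")) ::
           get_blocks_py_alt (lines.dropWhile (fun x => x != "*"))) := by
  induction n with
  | zero =>
    intro lines hl
    have : lines = [] := List.eq_nil_of_length_eq_zero (Nat.le_zero.mp hl)
    subst this
    refine ⟨by simp [gBlocks, get_blocks_py_alt], fun cur hc => ?_⟩
    simp [gBlocks, hc, get_blocks_py_alt]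
  | succ n ih =>
    intro lines hl
    match lines with
    | [] =>
      refine ⟨by simp [gBlocks, get_blocks_py_alt], fun cur hc => ?_⟩
      simp [gBlocks, hc, get_blocks_py_alt]
    | l :: rest =>
      have hrest : rest.length ≤ n := Nat.le_of_succ_le_succ hl
      constructor
      · by_cases hs : l == "*"
        · have h1 : gBlocks [] (l :: rest) = gBlocks [] rest := by simp [gBlocks, hs]
          have h2 : get_blocks_py_alt (l :: rest)
              = get_blocks_py_alt (rest.dropWhile (fun x => x == "*")) := by
            rw [get_blocks_py_alt]; simp [hs]
          rw [h1, h2, dropStar_eq, (ih rest hrest).1]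
        · have h1 : gBlocks [] (l :: rest) = gBlocks [l] rest := by simp [gBlocks, hs]
          rw [h1, (ih rest hrest).2 [l] (by simp)]
          rw [get_blocks_py_alt]
          simp [hs]
      · intro cur hc
        by_cases hs : l == "*"
        · have h1 : gBlocks cur (l :: rest) = [cur] ++ gBlocks [] rest := by
            simp [gBlocks, hs, hc]
          have ht : (l :: rest).takeWhile (fun x => x != "*") = [] := by
            simp [bne, hs]
          have hd : (l :: rest).dropWhile (fun x => x != "*") = l :: rest := by
            simp [bne, hs]
          rw [h1, ht, hd, (ih rest hrest).1]
          have h2 : get_blocks_py_alt (l :: rest)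
              = get_blocks_py_alt (rest.dropWhile (fun x => x == "*")) := by
            rw [get_blocks_py_alt]; simp [hs]
          rw [h2, dropStar_eq]
          simp
        · have h1 : gBlocks cur (l :: rest) = gBlocks (cur ++ [l]) rest := by
            simp [gBlocks, hs]
          have ht : (l :: rest).takeWhile (fun x => x != "*")
              = l :: rest.takeWhile (fun x => x != "*") := by
            simp [bne, hs]
          have hd : (l :: rest).dropWhile (fun x => x != "*")
              = rest.dropWhile (fun x => x != "*") := by
            simp [bne, hs]
          rw [h1, (ih rest hrest).2 (cur ++ [l]) (by simp), ht, hd]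
          simp

-- ===== VERDICT (by name: the statement is the Claim_ definition above) =====
theorem get_blocks_py_spec : Claim_equal_get_blocks_py := by
  intro lines _
  unfold Spec_get_blocks_py get_blocks_py
  have h := foldA_eq lines [] []
  simp only [List.filter_nil, List.nil_append] at h
  rw [h, (gBlocks_eq_alt lines.length lines le_rfl).1]
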